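-- pv_equiv track=rewrite | github.com/stacy-sg/algorithm | 2026-04/P388352_비밀코드해독.py | solution
-- ===== SOURCE A (Python) =====
-- from itertools import combinations
--
-- def solution(n, q, ans):
--     # 1. 쿼리 최적화: 탐색 속도(O(1))를 위해 각 시도(q[i])를 Set으로 변환
--     q_sets = [set(query) for query in q]
--     m = len(q)
--
--     valid_count = 0
--
--     # 2. 1부터 n까지의 숫자 중 5개를 고르는 모든 조합 탐색 (최대 142,506개)
--     for combo in combinations(range(1, n + 1), 5):
--         is_valid = True
--
--         # 3. 현재 조합이 모든 시도(query)의 응답(ans)과 정확히 일치하는지 검증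
--         for i in range(m):
--             # 조합(combo)의 숫자 중 q_sets[i]에 포함된 개수 세기
--             match_count = sum(1 for num in combo if num in q_sets[i])
--
--             # 단 하나라도 응답 결과와 다르면 즉시 가지치기(탈출)
--             if match_count != ans[i]:
--                 is_valid = False
--                 break
--
--         # 4. 모든 시도 조건을 완벽하게 통과한 조합이라면 정답 카운트 증가
--         if is_valid:
--             valid_count += 1
--
--     return valid_count
-- ===== SOURCE B (Python) =====
-- def solution(n, q, ans):
--     # Backtracking count: include/exclude each number 1..n, subtracting its per-query
--     # contribution from the remaining target vector, pruning impossible branches;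
--     # no combination is ever materialized.
--     if n < 5:
--         return 0
--     m = len(q)
--     target = tuple(ans[i] for i in range(m))
--     pat = [None] + [tuple(1 if num in q[i] else 0 for i in range(m))
--                     for num in range(1, n + 1)]
--
--     def count(start, k, rem):
--         if k == 0:
--             return 1 if all(r == 0 for r in rem) else 0
--         if n - start + 1 < k:
--             return 0
--         if any(r < 0 for r in rem):
--             return 0
--         p = pat[start]
--         taken = count(start + 1, k - 1, tuple(r - d for r, d in zip(rem, p)))
--         skipped = count(start + 1, k, rem)
--         return taken + skipped
--
--     return count(1, 5, target)
-- ===== Notes on version B (the rewrite author's own statement) =====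
-- stated objective: alternative
-- what changed: Instead of materializing every 5-combination with itertools and re-testing it against each query set, B counts valid codes by recursive include/exclude backtracking over the numbers 1..n, carrying the remaining target vector (ans minus contributions of chosen numbers) and pruning branches with a negative remainder or too few numbers left; no combination is ever built.
-- outside the precondition, e.g. on solution(5, [[1], [1]], [0]): A returns 0, B raises IndexError
import Mathlib
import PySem

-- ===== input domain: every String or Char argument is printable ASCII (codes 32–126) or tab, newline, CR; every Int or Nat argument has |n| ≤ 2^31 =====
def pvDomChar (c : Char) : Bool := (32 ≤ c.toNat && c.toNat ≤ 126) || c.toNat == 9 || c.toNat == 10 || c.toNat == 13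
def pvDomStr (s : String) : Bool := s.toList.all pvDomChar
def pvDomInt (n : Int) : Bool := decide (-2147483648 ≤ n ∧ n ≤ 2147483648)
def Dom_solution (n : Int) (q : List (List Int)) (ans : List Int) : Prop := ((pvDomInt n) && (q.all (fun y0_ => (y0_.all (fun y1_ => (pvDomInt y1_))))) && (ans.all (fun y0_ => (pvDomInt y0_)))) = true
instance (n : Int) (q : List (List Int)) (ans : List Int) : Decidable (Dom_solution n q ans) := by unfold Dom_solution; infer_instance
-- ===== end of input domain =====

-- B counts valid codes by include/exclude backtracking over the numbers 1..n, subtracting each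
-- chosen number's per-query contribution from the remaining target vector and pruning impossible
-- branches, instead of materializing every 5-combination and re-testing it ("alternative").

-- ===== PORT A =====
-- itertools.combinations(l, k) in lexicographic order of positions
def pyCombos : List Int → Nat → List (List Int)
  | _, 0 => [[]]
  | [], _ + 1 => []
  | x :: xs, k + 1 => (pyCombos xs k).map (x :: ·) ++ pyCombos xs (k + 1)

-- sum(1 for num in combo if num in q_sets[i])
def matchCountA (s : PySem.Set Int) (combo : List Int) : Int :=
  combo.foldl (fun acc num => if PySem.Set.contains s num then acc + 1 else acc) 0

-- 'for i in range(m): … if match_count != ans[i]: break' — positional walk over q_sets and ans;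
-- the case where ans runs out first is Python's IndexError (excluded by Pre_solution)
def chkA (combo : List Int) : List (PySem.Set Int) → List Int → Bool
  | [], _ => true
  | _ :: _, [] => false  -- Python raises IndexError here; outside Pre_solution
  | s :: rest, a :: arest =>
    if matchCountA s combo ≠ a then false else chkA combo rest arest

def solution (n : Int) (q : List (List Int)) (ans : List Int) : Int :=
  let qsets := q.map PySem.Set.ofList
  (pyCombos (PySem.List.pyRange 1 (n + 1) 1) 5).foldl
    (fun acc combo => if chkA combo qsets ans then acc + 1 else acc) 0

-- ===== PORT B =====
-- tuple(1 if num in q[i] else 0 for i in range(m))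
def patvec (q : List (List Int)) (num : Int) : List Int :=
  (List.range q.length).map (fun i => if num ∈ q.getD i [] then (1 : Int) else 0)

-- pat = [None] + [tuple(...) for num in range(1, n+1)]
def patB (n : Int) (q : List (List Int)) : List (Option (List Int)) :=
  none :: (PySem.List.pyRange 1 (n + 1) 1).map (fun num => some (patvec q num))

-- the recursive helper 'count(start, k, rem)' of Source B; pat[start] is only read when
-- 1 ≤ start ≤ n (guaranteed by the guards), so getD is exact there
def countB (n : Int) (pat : List (Option (List Int))) (start : Int) (k : Nat) (rem : List Int) : Int :=
  if _hk : k = 0 then (if rem.all (· == 0) then 1 else 0)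
  else if _hg : n - start + 1 < (k : Int) then 0
  else if rem.any (· < 0) then 0
  else
    let p := (pat.getD start.toNat none).getD []
    countB n pat (start + 1) (k - 1) (List.zipWith (fun r d => r - d) rem p)
      + countB n pat (start + 1) k rem
termination_by (n + 1 - start).toNat
decreasing_by all_goals omega

def solution_alt (n : Int) (q : List (List Int)) (ans : List Int) : Int :=
  if n < 5 then 0
  else
    let m := q.length
    -- target = tuple(ans[i] for i in range(m)); ans[i] raises IndexError when m > len(ans),
    -- which is outside Pre_solution, so getD is exact here
    let target := (List.range m).map (fun i => ans.getD i 0)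
    countB n (patB n q) 1 5 target

-- ===== PRECONDITION & SPEC =====
-- Pre_ excludes the inputs where ans is shorter than q while some 5-combination of 1..n exists (n ≥ 5):
-- there A's positional ans[i] lookup raises IndexError unless every combination already mismatches an
-- earlier query — a data-dependent condition, so A still returns (0) on some excluded inputs, where
-- B raises (building the target vector) as often as not.
def Pre_solution (n : Int) (q : List (List Int)) (ans : List Int) : Prop :=
  q.length ≤ ans.length ∨ n ≤ 4
instance (n : Int) (q : List (List Int)) (ans : List Int) : Decidable (Pre_solution n q ans) := by
  unfold Pre_solution; infer_instance

def pvWitness_solution : Int × List (List Int) × List Int := (6, [[1, 2, 3, 4, 5]], [5])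

def Spec_solution (n : Int) (q : List (List Int)) (ans : List Int) (out : Int) : Prop :=
  out = solution_alt n q ans
instance (n : Int) (q : List (List Int)) (ans : List Int) (out : Int) : Decidable (Spec_solution n q ans out) := by
  unfold Spec_solution; infer_instance

-- ===== CLAIM (what is proved, stated in full; the proofs are below) =====
def Claim_equal_solution : Prop := ∀ (n : Int) (q : List (List Int)) (ans : List Int), Dom_solution n q ans → Pre_solution n q ans → Spec_solution n q ans (solution n q ans)

-- ===== LEMMAS AND PROOFS =====

-- per-query match-count vector of a combination (the quantity both programs compare with ans)
def vecsum (q : List (List Int)) (c : List Int) : List Int :=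
  (List.range q.length).map (fun i => (c.countP (fun num => decide (num ∈ q.getD i [])) : Int))

theorem pyCombos_eq_nil (l : List Int) : ∀ (k : Nat), l.length < k → pyCombos l k = [] := by
  induction l with
  | nil => intro k h; cases k with
    | zero => simp at h
    | succ k => rfl
  | cons y ys ih =>
    intro k h
    cases k with
    | zero => simp at h
    | succ k =>
      simp only [List.length_cons] at h
      simp [pyCombos, ih k (by omega), ih (k + 1) (by omega)]

theorem chk_eq (combo : List Int) : ∀ (qs : List (PySem.Set Int)) (as : List Int), qs.length ≤ as.length →
    chkA combo qs as
      = (List.range qs.length).all (fun i => decide (matchCountA (qs.getD i []) combo = as.getD i 0)) := by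
  intro qs
  induction qs with
  | nil => intro as _; simp [chkA]
  | cons s rest ih =>
    intro as hlen
    cases as with
    | nil => simp at hlen
    | cons a arest =>
      simp only [List.length_cons] at hlen
      show (if matchCountA s combo ≠ a then false else chkA combo rest arest) = _
      rw [List.length_cons, List.range_succ_eq_map, List.all_cons, List.all_map]
      by_cases h : matchCountA s combo = a
      · simp only [h, ne_eq, not_true_eq_false, ite_false]
        rw [ih arest (by omega)]
        simp only [h, Function.comp_def, List.getD_cons_zero, List.getD_cons_succ, decide_true,
          Bool.true_and]
      · simp [h]

-- equality of two same-length range-maps as a Bool 'all'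
theorem all_decide_eq (m : Nat) (f g : Nat → Int) :
    ((List.range m).all (fun i => decide (f i = g i)))
      = decide ((List.range m).map f = (List.range m).map g) := by
  by_cases h : (List.range m).map f = (List.range m).map g
  · rw [decide_eq_true h]
    rw [List.map_inj_left] at h
    simp only [List.all_eq_true, List.mem_range, decide_eq_true_eq]
    intro x hx
    exact h x (List.mem_range.mpr hx)
  · rw [decide_eq_false h]
    rw [List.map_inj_left] at h
    push_neg at h
    obtain ⟨i, hi, hne⟩ := h
    exact List.all_eq_false.mpr ⟨i, hi, by simpa using hne⟩

-- empty combination: matches rem iff rem is all zeros (for rem of the right length)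
theorem vecsum_nil_eq (q : List (List Int)) (rem : List Int) (hlen : rem.length = q.length) :
    decide (vecsum q [] = rem) = rem.all (· == 0) := by
  by_cases h : vecsum q [] = rem
  · rw [decide_eq_true h]
    symm
    rw [List.all_eq_true]
    intro x hx
    rw [← h] at hx
    unfold vecsum at hx
    simp only [List.mem_map, List.mem_range] at hx
    obtain ⟨i, _, hxeq⟩ := hx
    simp [← hxeq]
  · rw [decide_eq_false h]
    symm
    rw [List.all_eq_false]
    by_contra hall
    push_neg at hall
    apply h
    apply List.ext_getElem (by simp [vecsum, hlen])
    intro i h1 h2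
    have hx := hall (rem[i]) (List.getElem_mem h2)
    simp only [beq_iff_eq, Bool.not_eq_false, decide_eq_true_eq] at hx
    simp [vecsum, hx]

theorem map_range_eq_iff (m : Nat) (f : Nat → Int) (l : List Int) (hl : l.length = m) :
    (List.range m).map f = l ↔ ∀ i < m, f i = l.getD i 0 := by
  constructor
  · intro h i hi
    have := congrArg (fun t => t.getD i 0) h
    simp only [List.getD_eq_getElem?_getD, List.getElem?_map, List.getElem?_range hi] at this
    simpa using this
  · intro h
    apply List.ext_getElem (by simp [hl])
    intro i h1 h2
    simp only [List.getElem_map, List.getElem_range]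
    have := h i (by simpa using h1)
    rwa [List.getD_eq_getElem?_getD, List.getElem?_eq_getElem h2, Option.getD_some] at this

theorem getD_zipWith_sub (rem pat : List Int) (i : Nat) (h1 : i < rem.length) (h2 : i < pat.length) :
    (List.zipWith (fun r d => r - d) rem pat).getD i 0 = rem.getD i 0 - pat.getD i 0 := by
  rw [List.getD_eq_getElem?_getD,
    List.getElem?_eq_getElem (by rw [List.length_zipWith]; omega), List.getElem_zipWith]
  simp [List.getD_eq_getElem?_getD, List.getElem?_eq_getElem h1, List.getElem?_eq_getElem h2]

theorem patvec_getD (q : List (List Int)) (x : Int) (i : Nat) (hi : i < q.length) :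
    (patvec q x).getD i 0 = if x ∈ q.getD i [] then (1 : Int) else 0 := by
  unfold patvec
  rw [List.getD_eq_getElem?_getD, List.getElem?_map, List.getElem?_range hi]
  rfl

theorem vecsum_cons_eq (q : List (List Int)) (x : Int) (c : List Int) (rem : List Int)
    (hlen : rem.length = q.length) :
    (vecsum q (x :: c) = rem)
      ↔ (vecsum q c = List.zipWith (fun r d => r - d) rem (patvec q x)) := by
  unfold vecsum
  rw [map_range_eq_iff q.length _ rem hlen,
      map_range_eq_iff q.length _ (List.zipWith (fun r d => r - d) rem (patvec q x))
        (by simp [patvec, hlen])]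
  have hz : ∀ i < q.length,
      (List.zipWith (fun r d : Int => r - d) rem (patvec q x)).getD i 0
        = rem.getD i 0 - (if x ∈ q.getD i [] then (1 : Int) else 0) := by
    intro i hi
    rw [getD_zipWith_sub rem (patvec q x) i (by omega) (by simp [patvec]; omega),
      patvec_getD q x i hi]
  constructor
  · intro h i hi
    have hx := h i hi
    rw [hz i hi]
    simp only [List.countP_cons] at hx
    by_cases hm : x ∈ q.getD i []
    · simp only [hm, decide_true, if_true] at hx ⊢
      push_cast at hx ⊢
      omega
    · simp only [hm, decide_false, if_false, Nat.add_zero] at hx ⊢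
      simpa using hx
  · intro h i hi
    have hx := h i hi
    rw [hz i hi] at hx
    simp only [List.countP_cons]
    by_cases hm : x ∈ q.getD i []
    · simp only [hm, decide_true, if_true] at hx ⊢
      push_cast at hx ⊢
      omega
    · simp only [hm, decide_false, if_false, Nat.add_zero] at hx ⊢
      simpa using hx

-- a negative remainder component kills every combination
theorem vecsum_ne_of_neg (q : List (List Int)) (c : List Int) (rem : List Int)
    (h : rem.any (· < 0) = true) : vecsum q c ≠ rem := by
  intro heq
  rw [List.any_eq_true] at h
  obtain ⟨x, hx, hneg⟩ := h
  rw [← heq] at hx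
  unfold vecsum at hx
  simp only [List.mem_map, List.mem_range] at hx
  obtain ⟨i, _, hxeq⟩ := hx
  simp only [decide_eq_true_eq] at hneg
  omega

theorem patB_getD (n : Int) (q : List (List Int)) (start : Int)
    (h1 : 1 ≤ start) (h2 : start ≤ n) :
    (patB n q).getD start.toNat none = some (patvec q start) := by
  unfold patB
  have hsn : start.toNat = (start.toNat - 1) + 1 := by omega
  rw [hsn, List.getD_cons_succ]
  rw [PySem.List.pyRange_one]
  rw [List.map_map, List.getD_eq_getElem?_getD, List.getElem?_map, List.getElem?_range
    (by omega : start.toNat - 1 < ((n + 1) - 1).toNat)]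
  simp only [Option.map_some, Option.getD_some, Function.comp_apply]
  congr 2
  omega

-- the backtracking count equals the brute-force count of matching combinations
theorem countB_eq (n : Int) (q : List (List Int)) :
    ∀ (fuel : Nat) (start : Int) (k : Nat) (rem : List Int),
      (n + 1 - start).toNat ≤ fuel → 1 ≤ start → rem.length = q.length →
      countB n (patB n q) start k rem
        = ((pyCombos (PySem.List.pyRange start (n + 1) 1) k).countP
            (fun c => decide (vecsum q c = rem)) : Int) := by
  intro fuel
  induction fuel with
  | zero =>
    intro start k rem hf h1 hlen
    rw [countB]
    cases k with
    | zero =>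
      have hnil : PySem.List.pyRange start (n + 1) 1 = [] :=
        PySem.List.pyRange_one_eq_nil (by omega)
      simp only [hnil]
      show (if rem.all (· == 0) then (1:Int) else 0) = _
      rw [show pyCombos [] 0 = [[]] from rfl]
      simp only [List.countP_cons, List.countP_nil]
      rw [vecsum_nil_eq q rem hlen]
      cases rem.all (· == 0) <;> simp
    | succ k =>
      have hg : n - start + 1 < ((k + 1 : Nat) : Int) := by push_cast; omega
      rw [dif_neg (by omega : ¬ (k + 1 = 0)), dif_pos hg]
      have hnil : PySem.List.pyRange start (n + 1) 1 = [] :=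
        PySem.List.pyRange_one_eq_nil (by omega)
      rw [hnil, show pyCombos [] (k + 1) = [] from rfl]
      simp
  | succ fuel ih =>
    intro start k rem hf h1 hlen
    rw [countB]
    cases k with
    | zero =>
      show (if rem.all (· == 0) then (1:Int) else 0) = _
      cases hnil : PySem.List.pyRange start (n + 1) 1 <;>
      · rw [show ∀ l : List Int, pyCombos l 0 = [[]] from fun _ => by cases ‹List Int› <;> rfl]
        simp only [List.countP_cons, List.countP_nil]
        rw [vecsum_nil_eq q rem hlen]
        cases rem.all (· == 0) <;> simp
    | succ k =>
      rw [dif_neg (by omega : ¬ (k + 1 = 0))]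
      by_cases hg : n - start + 1 < ((k + 1 : Nat) : Int)
      · rw [dif_pos hg]
        have hnil : pyCombos (PySem.List.pyRange start (n + 1) 1) (k + 1) = [] := by
          apply pyCombos_eq_nil
          rw [PySem.List.length_pyRange_one]
          push_cast at hg; omega
        rw [hnil]; simp
      · rw [dif_neg hg]
        push_cast at hg
        have hstart : start ≤ n := by omega
        by_cases hneg : rem.any (· < 0) = true
        · rw [if_pos hneg]
          symm
          rw [Int.natCast_eq_zero, List.countP_eq_zero]
          intro c _
          simpa using vecsum_ne_of_neg q c rem hneg
        · rw [if_neg hneg]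
          have hcons : PySem.List.pyRange start (n + 1) 1
              = start :: PySem.List.pyRange (start + 1) (n + 1) 1 :=
            PySem.List.pyRange_one_cons (by omega)
          rw [hcons]
          simp only [patB_getD n q start h1 hstart, Option.getD_some, Nat.add_sub_cancel]
          have hlen' : (List.zipWith (fun r d : Int => r - d) rem (patvec q start)).length
              = q.length := by simp [patvec, hlen]
          rw [ih (start + 1) k _ (by omega) (by omega) hlen',
              ih (start + 1) (k + 1) rem (by omega) (by omega) hlen]
          rw [show pyCombos (start :: PySem.List.pyRange (start + 1) (n + 1) 1) (k + 1)
              = (pyCombos (PySem.List.pyRange (start + 1) (n + 1) 1) k).map (start :: ·)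
                ++ pyCombos (PySem.List.pyRange (start + 1) (n + 1) 1) (k + 1) from rfl]
          rw [List.countP_append, List.countP_map]
          push_cast
          congr 2
          apply List.countP_congr
          intro c _
          simp only [Function.comp_apply, decide_eq_true_eq]
          exact (vecsum_cons_eq q start c rem hlen).symm

-- A's per-combination check, rephrased as equality with the target vector
theorem all_congr_mem {α : Type} (l : List α) (f g : α → Bool) (h : ∀ x ∈ l, f x = g x) :
    l.all f = l.all g := by
  induction l with
  | nil => rfl
  | cons x xs ih =>
    simp only [List.all_cons]
    rw [h x List.mem_cons_self, ih (fun y hy => h y (List.mem_cons_of_mem _ hy))]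

-- A's per-combination check, rephrased as equality with the target vector
theorem chk_vec (q : List (List Int)) (ans : List Int) (hlen : q.length ≤ ans.length)
    (combo : List Int) :
    chkA combo (q.map PySem.Set.ofList) ans
      = decide (vecsum q combo = (List.range q.length).map (fun i => ans.getD i 0)) := by
  rw [chk_eq combo (q.map PySem.Set.ofList) ans (by simpa using hlen), List.length_map]
  unfold vecsum
  rw [← all_decide_eq q.length
    (fun i => (combo.countP (fun num => decide (num ∈ q.getD i [])) : Int))
    (fun i => ans.getD i 0)]
  apply all_congr_mem
  intro i hi
  rw [List.mem_range] at hi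
  have hqs : (q.map PySem.Set.ofList).getD i [] = PySem.Set.ofList (q.getD i []) := by
    rw [List.getD_eq_getElem?_getD, List.getD_eq_getElem?_getD, List.getElem?_map,
      List.getElem?_eq_getElem hi]
    rfl
  have hmc : matchCountA ((q.map PySem.Set.ofList).getD i []) combo
      = (combo.countP (fun num => decide (num ∈ q.getD i [])) : Int) := by
    rw [hqs]
    unfold matchCountA
    rw [PySem.List.foldl_if_add_one, zero_add]
    congr 1
    apply List.countP_congr
    intro x _
    simp [PySem.Set.mem_ofList]
  rw [hmc]

-- ===== VERDICT (by name: the statement is the Claim_ definition above) =====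
theorem solution_spec : Claim_equal_solution := by
  intro n q ans _ hpre
  unfold Spec_solution
  by_cases hn : n < 5
  · have hnil : pyCombos (PySem.List.pyRange 1 (n + 1) 1) 5 = [] :=
      pyCombos_eq_nil _ 5 (by rw [PySem.List.length_pyRange_one]; omega)
    simp [solution, solution_alt, hnil, hn]
  · have hlen : q.length ≤ ans.length := by
      rcases hpre with h | h
      · exact h
      · omega
    rw [solution_alt, if_neg hn]
    show solution n q ans = countB n (patB n q) 1 5 ((List.range q.length).map (fun i => ans.getD i 0))
    rw [countB_eq n q (n + 1 - 1).toNat 1 5 _ (by omega) (by omega) (by simp)]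
    rw [solution]
    show (pyCombos (PySem.List.pyRange 1 (n + 1) 1) 5).foldl
        (fun acc combo => if chkA combo (q.map PySem.Set.ofList) ans then acc + 1 else acc) 0 = _
    rw [PySem.List.foldl_if_add_one, zero_add]
    congr 1
    apply List.countP_congr
    intro c _
    rw [chk_vec q ans hlen c]
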